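-- pv_equiv track=rewrite | github.com/iridescent99/codeforces | 1600/431C.py | ktree
-- ===== SOURCE A (Python) =====
-- def ktree(n, k, d):
--     MOD = 10**9 + 7
--     dp = [[0] * 2 for _ in range(0, n+2)]
--     dp[0][0] = 1
--     # 0 invalid 1 valid
--     for i in range(1, n+1):
--         for j in range(1, k+1):
--             if i - j < 0:
--                 break
--             prev_weight = i - j
--             if j < d:
--                 dp[i][0] = (dp[prev_weight][0] + dp[i][0]) % MOD
--                 dp[i][1] = (dp[prev_weight][1] + dp[i][1]) % MOD
--             else:
--                 dp[i][1] = (dp[i][1] + dp[prev_weight][0]) % MOD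
--                 dp[i][1] = (dp[i][1] + dp[prev_weight][1]) % MOD
--     return dp[n][1]
-- ===== SOURCE B (Python) =====
-- def ktree(n, k, d):
--     # Answer = (#paths with all edges in 1..k) - (#paths with all edges in 1..min(d-1,k)),
--     # each computed by a 1-D dp whose window sum comes from a running prefix-sum array.
--     MOD = 10**9 + 7
--     if n < 0:
--         return 0
--
--     def count(m):
--         m = max(m, 0)
--         # f[i] = number of compositions of i into parts 1..m, mod MOD
--         f = [1]
--         pre = [0, 1]  # pre[i] = f[0] + ... + f[i-1], mod MOD
--         for i in range(1, n + 1):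
--             lo = max(i - m, 0)
--             fi = (pre[i] - pre[lo]) % MOD
--             f.append(fi)
--             pre.append((pre[i] + fi) % MOD)
--         return f[n]
--
--     return (count(k) - count(min(d - 1, k))) % MOD
-- ===== Notes on version B (the rewrite author's own statement) =====
-- stated objective: faster
-- what changed: Replaces the O(n*k) two-state dp with inner edge loop by two O(n) sliding-window dps (compositions into parts 1..k and 1..min(d-1,k)) whose window sums come from a running prefix-sum array, and subtracts the two counts mod 1e9+7.
import Mathlib
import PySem

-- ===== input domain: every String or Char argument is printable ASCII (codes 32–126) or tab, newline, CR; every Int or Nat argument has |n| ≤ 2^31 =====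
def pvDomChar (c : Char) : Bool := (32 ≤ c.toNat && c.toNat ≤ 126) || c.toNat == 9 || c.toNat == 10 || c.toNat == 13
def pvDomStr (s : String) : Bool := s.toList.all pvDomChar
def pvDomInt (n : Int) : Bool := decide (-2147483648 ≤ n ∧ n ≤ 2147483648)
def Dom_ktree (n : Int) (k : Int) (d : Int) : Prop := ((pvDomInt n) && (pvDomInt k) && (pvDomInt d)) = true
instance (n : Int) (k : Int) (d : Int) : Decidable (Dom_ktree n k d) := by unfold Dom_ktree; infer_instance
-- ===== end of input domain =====

-- B replaces A's O(n·k) two-state dp (inner loop over edge weights) by two O(n) sliding-window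
-- dps over a running prefix-sum array and subtracts the two counts mod 10^9+7 (measured faster).

-- ===== PORT A =====
def pvM : Int := 1000000007

-- inner `for j in range(1, k+1)` with its `break`; ab accumulates (dp[i][0], dp[i][1])
def ktreeInner (dp : List (Int × Int)) (i : Int) (k : Int) (d : Int) (j : Int) (ab : Int × Int) :
    Int × Int :=
  if _h : j ≤ k then
    if i - j < 0 then ab  -- break
    else
      let pw := PySem.List.pyGetD dp (i - j) (0, 0)
      let ab' :=
        if j < d then ((pw.1 + ab.1) % pvM, (pw.2 + ab.2) % pvM)
        else (ab.1, ((ab.2 + pw.1) % pvM + pw.2) % pvM)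
      ktreeInner dp i k d (j + 1) ab'
  else ab
termination_by (k + 1 - j).toNat
decreasing_by omega

-- body of `for i in range(1, n+1)`: dp[i] gets the inner loop's accumulated pair
def astep (k : Int) (d : Int) (dp : List (Int × Int)) (i : Int) : List (Int × Int) :=
  PySem.List.pySetD dp i (ktreeInner dp i k d 1 (PySem.List.pyGetD dp i (0, 0)))

def ktree (n : Int) (k : Int) (d : Int) : Int :=
  let dp0 := (PySem.List.pyRange 0 (n + 2) 1).map (fun _ => ((0 : Int), (0 : Int)))
  -- dp[0][0] = 1  (on the empty list Python raises IndexError: outside Pre_)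
  let dp1 := match dp0 with
    | [] => []
    | r :: rs => (1, r.2) :: rs
  let dp := List.foldl (astep k d) dp1 (PySem.List.pyRange 1 (n + 1) 1)
  (PySem.List.pyGetD dp n (0, 0)).2

-- ===== PORT B =====
-- loop body of count(m): append f[i] (window sum of pre) and pre[i+1]
def bstep (m : Int) (st : List Int × List Int) (i : Int) : List Int × List Int :=
  let pre := st.2
  let lo := max (i - m) 0
  let fi := (PySem.List.pyGetD pre i 0 - PySem.List.pyGetD pre lo 0) % pvM
  (st.1 ++ [fi], pre ++ [(PySem.List.pyGetD pre i 0 + fi) % pvM])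

-- count(m): compositions of each 0..n into parts 1..m mod 10^9+7, window sums via prefix sums
def ktreeCount (n : Int) (m0 : Int) : Int :=
  let m := max m0 0
  let fp := List.foldl (bstep m) ([1], [0, 1]) (PySem.List.pyRange 1 (n + 1) 1)
  PySem.List.pyGetD fp.1 n 0

def ktree_alt (n : Int) (k : Int) (d : Int) : Int :=
  if n < 0 then 0
  else (ktreeCount n k - ktreeCount n (min (d - 1) k)) % pvM

-- ===== PRECONDITION & SPEC =====
-- Pre_ excludes only n ≤ -2, where A raises IndexError (dp is empty when dp[0][0]=1 runs).
def Pre_ktree (n : Int) (k : Int) (d : Int) : Prop := -1 ≤ n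
instance (n : Int) (k : Int) (d : Int) : Decidable (Pre_ktree n k d) := by
  unfold Pre_ktree; infer_instance

def pvWitness_ktree : Int × Int × Int := (3, 3, 2)

def Spec_ktree (n : Int) (k : Int) (d : Int) (out : Int) : Prop := out = ktree_alt n k d
instance (n : Int) (k : Int) (d : Int) (out : Int) : Decidable (Spec_ktree n k d out) := by
  unfold Spec_ktree; infer_instance

-- ===== CLAIM (what is proved, stated in full; the proofs are below) =====
def Claim_equal_ktree : Prop :=
  ∀ (n : Int) (k : Int) (d : Int), Dom_ktree n k d → Pre_ktree n k d → Spec_ktree n k d (ktree n k d)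

-- ===== LEMMAS AND PROOFS =====

-- exact (un-reduced) number of compositions of i into integer parts p with 1 ≤ p ≤ m
def cnt (m : Int) : Nat → Int
  | 0 => 1
  | (i+1) => ∑ t ∈ (Finset.range (i+1)).attach,
      (if ((i : Int) + 1 - (t : Nat)) ≤ m then cnt m t else 0)
decreasing_by
  have := t.2; simp only [Finset.mem_range] at this; omega

lemma cnt_succ (m : Int) (i : Nat) :
    cnt m (i+1) = ∑ t ∈ Finset.range (i+1),
      (if ((i : Int) + 1 - (t : Nat)) ≤ m then cnt m t else 0) := by
  rw [cnt, ← Finset.sum_attach (Finset.range (i+1))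
    (fun t => if ((i : Int) + 1 - (t : Nat)) ≤ m then cnt m t else 0)]

lemma cnt_clamp (m : Int) : ∀ i, cnt (max m 0) i = cnt m i := by
  intro i
  induction i using Nat.strong_induction_on with
  | _ i ih =>
    match i with
    | 0 => simp [cnt]
    | (i+1) =>
      rw [cnt_succ, cnt_succ]
      refine Finset.sum_congr rfl (fun t ht => ?_)
      simp only [Finset.mem_range] at ht
      rw [ih t (by omega)]
      have : ((i : Int) + 1 - (t : Nat)) ≤ max m 0 ↔ ((i : Int) + 1 - (t : Nat)) ≤ m := by
        constructor <;> intro h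
        · rcases le_max_iff.mp h with h' | h'
          · exact h'
          · omega
        · exact le_max_of_le_left h
      simp [this]

-- the reduced row values A's dp holds
def rowF (k d : Int) (t : Nat) : Int := cnt (min (d-1) k) t % pvM
def rowS (k d : Int) (t : Nat) : Int := (cnt k t - cnt (min (d-1) k) t) % pvM
def rowv (k d : Int) (t : Nat) : Int × Int := (rowF k d t, rowS k d t)

-- prefix sums of cnt (raw)
def pref (m : Int) (t : Nat) : Int := ∑ u ∈ Finset.range t, cnt m u

lemma pref_succ (m : Int) (t : Nat) : pref m (t+1) = pref m t + cnt m t :=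
  Finset.sum_range_succ _ _

-- cnt i as a window sum of the prefix (m ≥ 0)
lemma cnt_window (m : Int) (hm : 0 ≤ m) (i : Nat) (hi : 1 ≤ i) :
    cnt m i = pref m i - pref m ((max ((i : Int) - m) 0).toNat) := by
  obtain ⟨j, rfl⟩ : ∃ j, i = j + 1 := ⟨i - 1, by omega⟩
  set L : Nat := (max ((j : Int) + 1 - m) 0).toNat with hL
  have hmax : (0 : Int) ≤ max ((j : Int) + 1 - m) 0 := le_max_right _ _
  have hmax2 : max ((j : Int) + 1 - m) 0 ≤ (j : Int) + 1 := by
    apply max_le <;> omega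
  have hLle : L ≤ j + 1 := by omega
  rw [cnt_succ]
  have hsplit := Finset.sum_Ico_consecutive
    (f := fun t => if ((j : Int) + 1 - (t : Nat)) ≤ m then cnt m t else 0)
    (Nat.zero_le L) hLle
  rw [Finset.range_eq_Ico, ← hsplit]
  have h1 : ∑ t ∈ Finset.Ico 0 L,
      (if ((j : Int) + 1 - (t : Nat)) ≤ m then cnt m t else 0) = 0 := by
    apply Finset.sum_eq_zero
    intro t ht
    simp only [Finset.mem_Ico] at ht
    have : ¬ (((j : Int) + 1 - (t : Nat)) ≤ m) := by omega
    simp [this]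
  have h2 : ∑ t ∈ Finset.Ico L (j+1),
      (if ((j : Int) + 1 - (t : Nat)) ≤ m then cnt m t else 0) =
      ∑ t ∈ Finset.Ico L (j+1), cnt m t := by
    refine Finset.sum_congr rfl (fun t ht => ?_)
    simp only [Finset.mem_Ico] at ht
    have : ((j : Int) + 1 - (t : Nat)) ≤ m := by omega
    simp [this]
  have h3 := Finset.sum_Ico_consecutive (f := fun t => cnt m t) (Nat.zero_le L) hLle
  have hpre1 : pref m (j+1) = ∑ t ∈ Finset.Ico 0 (j+1), cnt m t := by
    rw [pref, Finset.range_eq_Ico]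
  have hpre2 : pref m L = ∑ t ∈ Finset.Ico 0 L, cnt m t := by
    rw [pref, Finset.range_eq_Ico]
  have e : (((j + 1 : Nat) : Int) - m) = ((j : Int) + 1 - m) := by push_cast; ring
  rw [h1, h2, hpre1, e, ← hL, hpre2, ← h3]
  ring

-- "parts" form: sum over the first edge weight v
lemma cnt_parts (m : Int) (i : Nat) (hi : 1 ≤ i) :
    cnt m i = ∑ v ∈ Finset.Ico 1 (i+1),
      (if ((v : Nat) : Int) ≤ m then cnt m (i - v) else 0) := by
  obtain ⟨j, rfl⟩ : ∃ j, i = j + 1 := ⟨i - 1, by omega⟩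
  rw [cnt_succ, Finset.sum_Ico_eq_sum_range]
  have hn : (j + 1 + 1 - 1) = j + 1 := by omega
  rw [hn, ← Finset.sum_range_reflect]
  refine Finset.sum_congr rfl (fun u hu => ?_)
  simp only [Finset.mem_range] at hu
  have e1 : ((j : Int) + 1 - ((j + 1 - 1 - u : Nat) : Int)) = (((1 + u : Nat)) : Int) := by
    omega
  have e2 : (j + 1 - 1 - u) = (j + 1 - (1 + u)) := by omega
  rw [e1, e2]

-- ---- B side ----

lemma bstep_spec (m : Int) (hm : 0 ≤ m) (j : Nat) :
    bstep m ((List.range (j+1)).map (fun t => cnt m t % pvM),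
             (List.range (j+2)).map (fun t => pref m t % pvM)) (((j+1 : Nat) : Int))
      = ((List.range (j+2)).map (fun t => cnt m t % pvM),
         (List.range (j+3)).map (fun t => pref m t % pvM)) := by
  have hget : ∀ (t : Nat), t < j+2 →
      PySem.List.pyGetD ((List.range (j+2)).map (fun t => pref m t % pvM)) ((t : Nat) : Int) 0
        = pref m t % pvM := by
    intro t ht
    rw [PySem.List.pyGetD_natCast]
    simp [List.getD_eq_getElem?_getD, List.getElem?_map, List.getElem?_range, ht]
  set L : Nat := (max (((j+1 : Nat) : Int) - m) 0).toNat with hLdef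
  have hLcast : ((L : Nat) : Int) = max (((j+1 : Nat) : Int) - m) 0 := by
    rw [hLdef]; exact Int.toNat_of_nonneg (le_max_right _ _)
  have hLlt : L < j + 2 := by
    have h2 : max (((j+1 : Nat) : Int) - m) 0 ≤ ((j+1 : Nat) : Int) := by
      apply max_le <;> omega
    omega
  have hwin := cnt_window m hm (j+1) (by omega)
  unfold bstep
  simp only []
  rw [show (max ((((j+1 : Nat)) : Int) - m) 0) = ((L : Nat) : Int) from hLcast.symm]
  rw [hget (j+1) (by omega), hget L hLlt]
  have hfi : (pref m (j+1) % pvM - pref m L % pvM) % pvM = cnt m (j+1) % pvM := by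
    rw [← Int.sub_emod, ← hwin]
  have hpr : (pref m (j+1) % pvM + cnt m (j+1) % pvM) % pvM = pref m (j+2) % pvM := by
    rw [← Int.add_emod, pref_succ m (j+1)]
  rw [hfi, hpr]
  simp [List.range_succ]

lemma countB_loop (m : Int) (hm : 0 ≤ m) : ∀ (j : Nat),
    List.foldl (bstep m) ([1], [0, 1]) ((List.range j).map (fun u => (1 : Int) + (u : Nat))) =
      ((List.range (j+1)).map (fun t => cnt m t % pvM),
       (List.range (j+2)).map (fun t => pref m t % pvM)) := by
  intro j
  induction j with
  | zero =>
      simp only [List.range_zero, List.map_nil, List.foldl_nil]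
      have h0 : cnt m 0 = 1 := by simp [cnt]
      have hp0 : pref m 0 = 0 := by simp [pref]
      have hp1 : pref m 1 = 1 := by simp [pref, Finset.sum_range_succ, h0]
      have : (List.range 1) = [0] := rfl
      have h2 : (List.range 2) = [0, 1] := rfl
      simp [this, h2, h0, hp0, hp1, pvM]
  | succ j ih =>
      rw [List.range_succ, List.map_append, List.foldl_append, ih]
      simp only [List.map_cons, List.map_nil, List.foldl_cons, List.foldl_nil]
      have e : (1 : Int) + (j : Nat) = (((j+1 : Nat)) : Int) := by push_cast; ring
      rw [e, bstep_spec m hm j]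

lemma countB_spec (n : Int) (hn : 0 ≤ n) (m : Int) :
    ktreeCount n m = cnt m n.toNat % pvM := by
  rw [show ktreeCount n m = PySem.List.pyGetD
        (List.foldl (bstep (max m 0)) ([1], [0, 1]) (PySem.List.pyRange 1 (n+1) 1)).1 n 0
      from rfl]
  rw [PySem.List.pyRange_one]
  have hN : (n + 1 - 1).toNat = n.toNat := by omega
  rw [hN, countB_loop (max m 0) (le_max_right _ _) n.toNat]
  rw [show n = ((n.toNat : Nat) : Int) by omega, PySem.List.pyGetD_natCast]
  rw [List.getD_eq_getElem?_getD]
  simp [List.getElem?_map, List.getElem?_range, Nat.lt_succ_self, cnt_clamp, Int.toNat_natCast]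
  rw [show (max n 0) = n from max_eq_left hn]

-- ---- A side: inner loop ----

def SFsum (k d : Int) (i' : Nat) (jj : Nat) : Int :=
  ∑ u ∈ Finset.Ico 1 jj, (if (u : Int) < d then cnt (min (d-1) k) (i' - u) else 0)

def SBsum (k d : Int) (i' : Nat) (jj : Nat) : Int :=
  ∑ u ∈ Finset.Ico 1 jj,
    (if (u : Int) < d then cnt k (i' - u) - cnt (min (d-1) k) (i' - u) else cnt k (i' - u))

lemma SFsum_succ (k d : Int) (i' jj : Nat) (h : 1 ≤ jj) :
    SFsum k d i' (jj+1) = SFsum k d i' jj +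
      (if (jj : Int) < d then cnt (min (d-1) k) (i' - jj) else 0) :=
  Finset.sum_Ico_succ_top h _

lemma SBsum_succ (k d : Int) (i' jj : Nat) (h : 1 ≤ jj) :
    SBsum k d i' (jj+1) = SBsum k d i' jj +
      (if (jj : Int) < d then cnt k (i' - jj) - cnt (min (d-1) k) (i' - jj)
       else cnt k (i' - jj)) :=
  Finset.sum_Ico_succ_top h _

lemma SF_total (k d : Int) (i' : Nat) (hi : 1 ≤ i') :
    SFsum k d i' (min i' ((max k 0).toNat) + 1) = cnt (min (d-1) k) i' := by
  set E := min i' ((max k 0).toNat) with hE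
  rw [cnt_parts (min (d-1) k) i' hi]
  rw [← Finset.sum_Ico_consecutive
      (f := fun v => if ((v : Nat) : Int) ≤ min (d-1) k then cnt (min (d-1) k) (i' - v) else 0)
      (show 1 ≤ E + 1 by omega) (show E + 1 ≤ i' + 1 by omega)]
  have tail0 : ∑ v ∈ Finset.Ico (E+1) (i'+1),
      (if ((v : Nat) : Int) ≤ min (d-1) k then cnt (min (d-1) k) (i' - v) else 0) = 0 := by
    apply Finset.sum_eq_zero
    intro v hv
    simp only [Finset.mem_Ico] at hv
    have : ¬ (((v : Nat) : Int) ≤ min (d-1) k) := by omega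
    simp [this]
  rw [tail0, add_zero]
  unfold SFsum
  refine Finset.sum_congr rfl (fun v hv => ?_)
  simp only [Finset.mem_Ico] at hv
  have hvk : ((v : Nat) : Int) ≤ k := by omega
  by_cases hvd : ((v : Nat) : Int) < d
  · simp [hvd, show ((v : Nat) : Int) ≤ min (d-1) k by omega]
  · simp [hvd, show ¬ (((v : Nat) : Int) ≤ min (d-1) k) by omega]

lemma ST_total (k d : Int) (i' : Nat) (hi : 1 ≤ i') :
    ∑ v ∈ Finset.Ico 1 (min i' ((max k 0).toNat) + 1), cnt k (i' - v) = cnt k i' := by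
  set E := min i' ((max k 0).toNat) with hE
  rw [cnt_parts k i' hi]
  rw [← Finset.sum_Ico_consecutive
      (f := fun v => if ((v : Nat) : Int) ≤ k then cnt k (i' - v) else 0)
      (show 1 ≤ E + 1 by omega) (show E + 1 ≤ i' + 1 by omega)]
  have tail0 : ∑ v ∈ Finset.Ico (E+1) (i'+1),
      (if ((v : Nat) : Int) ≤ k then cnt k (i' - v) else 0) = 0 := by
    apply Finset.sum_eq_zero
    intro v hv
    simp only [Finset.mem_Ico] at hv
    have : ¬ (((v : Nat) : Int) ≤ k) := by omega
    simp [this]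
  rw [tail0, add_zero]
  refine (Finset.sum_congr rfl (fun v hv => ?_)).symm
  simp only [Finset.mem_Ico] at hv
  have hvk : ((v : Nat) : Int) ≤ k := by omega
  simp [hvk]

lemma SB_total (k d : Int) (i' : Nat) (hi : 1 ≤ i') :
    SBsum k d i' (min i' ((max k 0).toNat) + 1) = cnt k i' - cnt (min (d-1) k) i' := by
  have hsplit : SBsum k d i' (min i' ((max k 0).toNat) + 1) =
      (∑ v ∈ Finset.Ico 1 (min i' ((max k 0).toNat) + 1), cnt k (i' - v)) -
        SFsum k d i' (min i' ((max k 0).toNat) + 1) := by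
    unfold SBsum SFsum
    rw [← Finset.sum_sub_distrib]
    refine Finset.sum_congr rfl (fun v _ => ?_)
    by_cases hvd : ((v : Nat) : Int) < d <;> simp [hvd]
  rw [hsplit, ST_total k d i' hi, SF_total k d i' hi]

lemma inner_loop_spec (dp : List (Int × Int)) (k d : Int) (i' : Nat)
    (hread : ∀ t : Nat, t < i' → dp[t]? = some (rowv k d t)) :
    ∀ (rem jj : Nat), 1 ≤ jj → jj + rem = min i' ((max k 0).toNat) + 1 →
      ktreeInner dp (i' : Int) k d (jj : Int) (SFsum k d i' jj % pvM, SBsum k d i' jj % pvM)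
        = (SFsum k d i' (min i' ((max k 0).toNat) + 1) % pvM,
           SBsum k d i' (min i' ((max k 0).toNat) + 1) % pvM) := by
  intro rem
  induction rem with
  | zero =>
      intro jj h1 h2
      have hjj : jj = min i' ((max k 0).toNat) + 1 := by omega
      subst hjj
      by_cases hk : ((min i' ((max k 0).toNat) + 1 : Nat) : Int) ≤ k
      · have hbr : (i' : Int) - ((min i' ((max k 0).toNat) + 1 : Nat) : Int) < 0 := by omega
        rw [ktreeInner, dif_pos hk, if_pos hbr]
      · rw [ktreeInner, dif_neg hk]
  | succ rem ih =>
      intro jj h1 h2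
      have hjE : jj ≤ min i' ((max k 0).toNat) := by omega
      have hk : ((jj : Nat) : Int) ≤ k := by omega
      have hbr : ¬ ((i' : Int) - ((jj : Nat) : Int) < 0) := by omega
      rw [ktreeInner, dif_pos hk, if_neg hbr]
      have hidx : (i' : Int) - ((jj : Nat) : Int) = ((i' - jj : Nat) : Int) := by omega
      have hpw : PySem.List.pyGetD dp ((i' : Int) - ((jj : Nat) : Int)) (0, 0)
          = rowv k d (i' - jj) := by
        rw [hidx, PySem.List.pyGetD_natCast, List.getD_eq_getElem?_getD,
            hread (i' - jj) (by omega)]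
        rfl
      have hcast : ((jj : Nat) : Int) + 1 = ((jj + 1 : Nat) : Int) := by push_cast; ring
      by_cases hd : ((jj : Nat) : Int) < d
      · have hA : ((rowv k d (i' - jj)).1 + SFsum k d i' jj % pvM) % pvM
            = SFsum k d i' (jj+1) % pvM := by
          rw [rowv, rowF]
          rw [← Int.add_emod, SFsum_succ k d i' jj h1, if_pos hd]
          ring_nf
        have hB : ((rowv k d (i' - jj)).2 + SBsum k d i' jj % pvM) % pvM
            = SBsum k d i' (jj+1) % pvM := by
          rw [rowv, rowS]
          rw [← Int.add_emod, SBsum_succ k d i' jj h1, if_pos hd]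
          ring_nf
        simp only [hpw, if_pos hd, hA, hB, hcast]
        exact ih (jj+1) (by omega) (by omega)
      · have hA' : SFsum k d i' jj = SFsum k d i' (jj+1) := by
          rw [SFsum_succ k d i' jj h1, if_neg hd]; ring
        have hB : ((SBsum k d i' jj % pvM + (rowv k d (i' - jj)).1) % pvM
              + (rowv k d (i' - jj)).2) % pvM = SBsum k d i' (jj+1) % pvM := by
          rw [rowv, rowF, rowS]
          rw [show (SBsum k d i' jj % pvM + cnt (min (d-1) k) (i' - jj) % pvM) % pvM
              = (SBsum k d i' jj + cnt (min (d-1) k) (i' - jj)) % pvM from (Int.add_emod _ _ _).symm]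
          rw [show ((SBsum k d i' jj + cnt (min (d-1) k) (i' - jj)) % pvM
              + (cnt k (i' - jj) - cnt (min (d-1) k) (i' - jj)) % pvM) % pvM
              = ((SBsum k d i' jj + cnt (min (d-1) k) (i' - jj))
                 + (cnt k (i' - jj) - cnt (min (d-1) k) (i' - jj))) % pvM
             from (Int.add_emod _ _ _).symm]
          rw [SBsum_succ k d i' jj h1, if_neg hd]
          ring_nf
        simp only [hpw, if_neg hd, hB, hcast, hA']
        exact ih (jj+1) (by omega) (by omega)

lemma inner_spec (dp : List (Int × Int)) (k d : Int) (i' : Nat) (hpos : 1 ≤ i')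
    (hread : ∀ t : Nat, t < i' → dp[t]? = some (rowv k d t)) :
    ktreeInner dp (i' : Int) k d 1 (0, 0) = rowv k d i' := by
  have h1 : SFsum k d i' 1 = 0 := by simp [SFsum]
  have h2 : SBsum k d i' 1 = 0 := by simp [SBsum]
  have := inner_loop_spec dp k d i' hread (min i' ((max k 0).toNat)) 1 (by omega) (by omega)
  rw [h1, h2] at this
  norm_num at this
  rw [this]
  rw [SF_total k d i' hpos, SB_total k d i' hpos]
  rfl

-- ---- A side: outer loop ----

def dpAt (k d : Int) (N j : Nat) : List (Int × Int) :=
  (List.range (N+2)).map (fun t => if t ≤ j then rowv k d t else (0, 0))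

lemma rowv_zero (k d : Int) : rowv k d 0 = (1, 0) := by
  have h : cnt (min (d-1) k) 0 = 1 := by simp [cnt]
  have h2 : cnt k 0 = 1 := by simp [cnt]
  simp [rowv, rowF, rowS, h, h2]
  norm_num [pvM]

lemma astep_spec (k d : Int) (N j : Nat) (hj : j + 1 ≤ N+1) :
    astep k d (dpAt k d N j) (((j+1 : Nat) : Int)) = dpAt k d N (j+1) := by
  have hget : PySem.List.pyGetD (dpAt k d N j) (((j+1 : Nat) : Int)) (0, 0) = (0, 0) := by
    rw [PySem.List.pyGetD_natCast, List.getD_eq_getElem?_getD]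
    simp [dpAt, List.getElem?_map, List.getElem?_range, show j+1 < N+2 by omega]
  have hread : ∀ t : Nat, t < j+1 → (dpAt k d N j)[t]? = some (rowv k d t) := by
    intro t ht
    simp [dpAt, List.getElem?_map, List.getElem?_range, show t < N+2 by omega,
      show t ≤ j by omega]
  unfold astep
  rw [hget, inner_spec (dpAt k d N j) k d (j+1) (by omega) hread]
  rw [PySem.List.pySetD_natCast]
  apply List.ext_getElem
  · simp [dpAt]
  · intro t ht1 ht2
    simp only [dpAt] at *
    rw [List.getElem_set]
    simp only [List.getElem_map, List.getElem_range]
    by_cases h : j + 1 = t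
    · subst h
      simp
    · simp only [if_neg h]
      by_cases h3 : t ≤ j
      · simp [h3, show t ≤ j+1 by omega]
      · simp [h3, show ¬ (t ≤ j+1) by omega]

lemma outer_loop (k d : Int) (N : Nat) :
    ∀ j, j ≤ N → List.foldl (astep k d) (dpAt k d N 0)
      ((List.range j).map (fun u => (1 : Int) + (u : Nat))) = dpAt k d N j := by
  intro j
  induction j with
  | zero => simp
  | succ j ih =>
      intro hj
      rw [List.range_succ, List.map_append, List.foldl_append, ih (by omega)]
      simp only [List.map_cons, List.map_nil, List.foldl_cons, List.foldl_nil]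
      have e : (1 : Int) + (j : Nat) = ((j+1 : Nat) : Int) := by push_cast; ring
      rw [e, astep_spec k d N j (by omega)]

lemma ktree_spec_nonneg (n k d : Int) (hn : 0 ≤ n) : ktree n k d = ktree_alt n k d := by
  set N := n.toNat with hNdef
  have hn' : n = ((N : Nat) : Int) := by omega
  have hdpAt0 : dpAt k d N 0 = (1, 0) :: List.replicate (N+1) ((0 : Int), (0 : Int)) := by
    rw [dpAt, List.range_succ_eq_map, List.map_cons, List.map_map]
    simp [rowv_zero, Function.comp_def, List.map_const']
  have hinit : (match (PySem.List.pyRange 0 (n + 2) 1).map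
        (fun _ => ((0 : Int), (0 : Int))) with
      | [] => ([] : List (Int × Int))
      | r :: rs => (1, r.2) :: rs) = dpAt k d N 0 := by
    rw [PySem.List.pyRange_one]
    have h2 : ((n + 2 - 0).toNat) = N + 2 := by omega
    rw [h2, hdpAt0]
    simp [Function.comp_def, List.map_const', List.replicate_succ]
  rw [show ktree n k d = (PySem.List.pyGetD
      (List.foldl (astep k d)
        (match (PySem.List.pyRange 0 (n + 2) 1).map (fun _ => ((0 : Int), (0 : Int))) with
         | [] => ([] : List (Int × Int))
         | r :: rs => (1, r.2) :: rs)
        (PySem.List.pyRange 1 (n + 1) 1)) n (0, 0)).2 from rfl]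
  rw [hinit]
  rw [show PySem.List.pyRange 1 (n + 1) 1
      = (List.range N).map (fun u => (1 : Int) + (u : Nat)) from by
    rw [PySem.List.pyRange_one]
    have : ((n + 1 - 1).toNat) = N := by omega
    rw [this]]
  rw [outer_loop k d N N (le_refl N)]
  have hgetN : PySem.List.pyGetD (dpAt k d N N) n (0, 0) = rowv k d N := by
    rw [hn', PySem.List.pyGetD_natCast, List.getD_eq_getElem?_getD]
    simp [dpAt, List.getElem?_map, List.getElem?_range, show N < N+2 by omega]
  rw [hgetN]
  rw [show ktree_alt n k d = (ktreeCount n k - ktreeCount n (min (d-1) k)) % pvM from by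
    rw [ktree_alt, if_neg (by omega)]]
  rw [countB_spec n hn k, countB_spec n hn (min (d-1) k), ← Int.sub_emod]
  rfl

-- ===== VERDICT (by name: the statement is the Claim_ definition above) =====
theorem ktree_spec : Claim_equal_ktree := by
  intro n k d _ hpre
  unfold Spec_ktree
  rcases lt_or_ge n 0 with hneg | hge
  · -- n = -1
    have hn : n = -1 := by unfold Pre_ktree at hpre; omega
    subst hn
    have h1 : PySem.List.pyRange 0 1 1 = [0] := by decide
    have h2 : PySem.List.pyRange (1:Int) 0 1 = [] := by decide
    simp [ktree, ktree_alt, h1, h2, PySem.List.pyGetD, PySem.List.pyGet?, PySem.List.pyIdx?]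
  · exact ktree_spec_nonneg n k d hge
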